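-- pv_equiv track=rewrite | github.com/arist0crab/bmstu-iu7-4sem-compalgth | lab_01/src/filereader.py | _is_simple_float
-- ===== SOURCE A (Python) =====
-- def _is_simple_float(s):
--     if not s:
--         return False
--
--     s = s.strip()
--     if not s:
--         return False
--
--     if s[0] in '+-':
--         s = s[1:]
--
--     if not s:
--         return False
--
--     dot_count = 0
--     for char in s:
--         if char == '.':
--             dot_count += 1
--             if dot_count > 1:
--                 return False
--         elif not char.isdigit():
--             return False
--
--     return True
-- ===== SOURCE B (Python) =====
-- def _is_simple_float(s):
--     if not s:
--         return False
--
--     s = s.strip()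
--     if not s:
--         return False
--
--     if s[0] in '+-':
--         s = s[1:]
--
--     if not s:
--         return False
--
--     parts = s.split('.')
--     if len(parts) > 2:
--         return False
--     return all(p == '' or p.isdigit() for p in parts)
-- ===== Notes on version B (the rewrite author's own statement) =====
-- stated objective: simpler
-- what changed: Replaces the character-by-character scan with a mutable dot counter by a single split at the decimal point: at most two parts, each empty or all digits.
import Mathlib
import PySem

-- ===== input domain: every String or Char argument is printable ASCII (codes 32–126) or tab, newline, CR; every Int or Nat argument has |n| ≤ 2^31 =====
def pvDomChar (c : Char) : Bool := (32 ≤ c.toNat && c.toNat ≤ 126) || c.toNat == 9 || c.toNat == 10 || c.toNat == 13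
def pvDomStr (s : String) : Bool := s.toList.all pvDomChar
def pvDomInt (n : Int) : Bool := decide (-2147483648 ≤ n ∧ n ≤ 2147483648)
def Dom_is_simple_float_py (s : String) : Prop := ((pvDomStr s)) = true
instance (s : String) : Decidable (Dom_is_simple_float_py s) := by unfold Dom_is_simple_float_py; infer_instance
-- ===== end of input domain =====

-- B replaces A's char-scan with a mutable dot counter by one split at the decimal point (at most
-- two parts, each empty or all digits); same result, a simpler decomposition.

-- ===== PORT A =====
-- the for-loop over the characters, state = dot_count
def pvScanA : List Char → Nat → Bool
  | [], _ => true
  | c :: rest, dc =>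
    if c = '.' then
      if dc + 1 > 1 then false else pvScanA rest (dc + 1)
    else if ¬ (PySem.Chars.isdigit c = true) then false
    else pvScanA rest dc

def is_simple_float_py (s : String) : Bool :=
  if s.toList = [] then false
  else
    let t := PySem.Chars.strip s.toList
    if t = [] then false
    else
      let t' := match t with
        | c :: rest => if c = '+' ∨ c = '-' then rest else t
        | [] => t
      if t' = [] then false
      else pvScanA t' 0

-- ===== PORT B =====
-- Source B's split call is ported as Mathlib's List.splitOn, which matches Python's
-- single-character split exactly.
def is_simple_float_py_alt (s : String) : Bool :=
  if s.toList = [] then false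
  else
    let t := PySem.Chars.strip s.toList
    if t = [] then false
    else
      let t' := match t with
        | c :: rest => if c = '+' ∨ c = '-' then rest else t
        | [] => t
      if t' = [] then false
      else
        let parts := t'.splitOn '.'
        if parts.length > 2 then false
        else parts.all (fun p => decide (p = []) || PySem.Chars.strIsdigit p)

-- ===== PRECONDITION & SPEC =====
def Spec_is_simple_float_py (s : String) (out : Bool) : Prop := out = is_simple_float_py_alt s
instance (s : String) (out : Bool) : Decidable (Spec_is_simple_float_py s out) := by unfold Spec_is_simple_float_py; infer_instance

-- ===== CLAIM (what is proved, stated in full; the proofs are below) =====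
def Claim_equal_is_simple_float_py : Prop := ∀ (s : String), Dom_is_simple_float_py s → Spec_is_simple_float_py s (is_simple_float_py s)

-- ===== LEMMAS AND PROOFS =====

-- A's scan, characterised: with dot budget 1 - dc remaining
theorem pvScanA_iff (cs : List Char) : ∀ dc : Nat, dc ≤ 1 →
    (pvScanA cs dc = true ↔
      cs.count '.' + dc ≤ 1 ∧ ∀ c ∈ cs, c = '.' ∨ PySem.Chars.isdigit c = true) := by
  induction cs with
  | nil => intro dc h; simp [pvScanA]; omega
  | cons c rest ih =>
    intro dc h
    by_cases hc : c = '.'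
    · subst hc
      simp only [pvScanA, if_pos rfl]
      by_cases hdc : dc + 1 > 1
      · simp only [if_pos hdc]
        constructor
        · intro habs; exact absurd habs (by simp)
        · rintro ⟨hcnt, -⟩
          simp [List.count_cons] at hcnt; omega
      · simp only [if_neg hdc, if_true]
        rw [ih (dc + 1) (by omega)]
        simp [List.count_cons]
        intro _
        omega
    · simp only [pvScanA, if_neg hc]
      by_cases hd : PySem.Chars.isdigit c = true
      · simp only [hd, not_true, if_false]
        rw [ih dc h]
        have hcnt : (c :: rest).count '.' = rest.count '.' := by
          simp [List.count_cons, hc]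
        rw [hcnt]
        constructor
        · rintro ⟨h1, h2⟩
          refine ⟨h1, fun x hx => ?_⟩
          rcases List.mem_cons.1 hx with rfl | hx
          · exact Or.inr hd
          · exact h2 x hx
        · rintro ⟨h1, h2⟩
          exact ⟨h1, fun x hx => h2 x (List.mem_cons_of_mem _ hx)⟩
      · rw [if_pos (by simpa using hd)]
        constructor
        · intro habs; exact absurd habs (by simp)
        · rintro ⟨-, h2⟩
          rcases h2 c (by simp) with h | h
          · exact absurd h hc
          · exact absurd h hd

-- B's split, characterised: part count = dot count + 1
theorem length_splitOnP {α : Type} (p : α → Bool) (cs : List α) :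
    (cs.splitOnP p).length = cs.countP p + 1 := by
  induction cs with
  | nil => simp [List.splitOnP_nil]
  | cons c rest ih =>
    rw [List.splitOnP_cons]
    by_cases hp : p c = true
    · simp [hp, ih, List.countP_cons]
    · have hne : (rest.splitOnP p).length ≠ 0 := by
        rw [ih]; omega
      simp [hp, List.length_modifyHead, ih, List.countP_cons]

-- every char of every part of splitOnP is a non-p char of cs, and together they are all of them
theorem all_splitOnP {α : Type} (p q : α → Bool) (cs : List α) :
    ((cs.splitOnP p).all (fun part => part.all q)) = cs.all (fun c => p c || q c) := by
  induction cs with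
  | nil => simp [List.splitOnP_nil]
  | cons c rest ih =>
    rw [List.splitOnP_cons]
    by_cases hp : p c = true
    · simp [hp, ih]
    · cases hrest : rest.splitOnP p with
      | nil =>
        exfalso
        have := length_splitOnP p rest
        rw [hrest] at this; simp at this
      | cons hd tl =>
        rw [hrest] at ih
        simp only [List.modifyHead, List.all_cons, hp, Bool.false_or] at *
        rw [← ih]
        simp [Bool.and_assoc]

-- the two inner checks agree on every character list
theorem scan_eq_split (cs : List Char) :
    pvScanA cs 0 =
      (if (cs.splitOn '.').length > 2 then false
       else (cs.splitOn '.').all (fun p => decide (p = []) || PySem.Chars.strIsdigit p)) := by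
  have hlen : (cs.splitOn '.').length = cs.count '.' + 1 := by
    simpa [List.splitOn, List.count] using length_splitOnP (fun c => c == '.') cs
  have hall : ((cs.splitOn '.').all (fun p => decide (p = []) || PySem.Chars.strIsdigit p))
      = cs.all (fun c => c == '.' || PySem.Chars.isdigit c) := by
    have hpart : ∀ p : List Char,
        (decide (p = []) || PySem.Chars.strIsdigit p) = p.all PySem.Chars.isdigit := by
      intro p; cases p <;> simp [PySem.Chars.strIsdigit]
    calc ((cs.splitOn '.').all (fun p => decide (p = []) || PySem.Chars.strIsdigit p))
        = (cs.splitOn '.').all (fun p => p.all PySem.Chars.isdigit) := by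
          simp only [hpart]
      _ = cs.all (fun c => c == '.' || PySem.Chars.isdigit c) := by
          simpa [List.splitOn] using all_splitOnP (fun c => c == '.') PySem.Chars.isdigit cs
  by_cases hb : pvScanA cs 0 = true
  · have h := (pvScanA_iff cs 0 (by omega)).1 hb
    rw [hb]
    rw [if_neg (by omega), hall]
    symm
    simp only [List.all_eq_true]
    intro c hc
    rcases h.2 c hc with h' | h' <;> simp [h']
  · have hb' : pvScanA cs 0 = false := by
      cases h' : pvScanA cs 0
      · rfl
      · exact absurd h' hb
    rw [hb']
    have h := fun hh => hb ((pvScanA_iff cs 0 (by omega)).2 hh)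
    by_cases hcnt : cs.count '.' + 0 ≤ 1
    · have h2 : ¬ ∀ c ∈ cs, c = '.' ∨ PySem.Chars.isdigit c = true := fun hh => h ⟨hcnt, hh⟩
      rw [if_neg (by omega), hall]
      symm
      rw [List.all_eq_false]
      push_neg at h2
      obtain ⟨c, hc, h3, h4⟩ := h2
      exact ⟨c, hc, by simp [h3, h4]⟩
    · rw [if_pos (by omega)]

-- ===== VERDICT (by name: the statement is the Claim_ definition above) =====
theorem is_simple_float_py_spec : Claim_equal_is_simple_float_py := by
  intro s _
  unfold Spec_is_simple_float_py is_simple_float_py is_simple_float_py_alt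
  by_cases h1 : s.toList = []
  · simp [h1]
  · simp only [if_neg h1]
    by_cases h2 : PySem.Chars.strip s.toList = []
    · simp [h2]
    · simp only [if_neg h2]
      cases ht : PySem.Chars.strip s.toList with
      | nil => exact absurd ht h2
      | cons c rest =>
        by_cases hs : c = '+' ∨ c = '-'
        · simp only [if_pos hs]
          by_cases h3 : rest = []
          · simp [h3]
          · simp only [if_neg h3]
            exact scan_eq_split rest
        · simp only [if_neg hs]
          rw [if_neg (by simp)]
          exact scan_eq_split (c :: rest)
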